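-- pv_equiv track=rewrite | github.com/harmeling/kurt-web | kurt.py | split_into_lists
-- ===== SOURCE A (Python) =====
-- from typing import TypeAlias, Literal, Callable, TypeVar, Generic, Iterator, TextIO, Optional, get_args
--
-- T = TypeVar('T')
--
-- def split_into_lists(lst: list[T], n: int) -> Iterator[list[list[T]]]:
--     """
--     Lazily yield every way to split `lst` into `n` consecutive, non-empty sub-lists.
--
--     Example
--     -------
--     >>> list(split_into_lists([1, 2, 3, 4], 2))
--     [[[1], [2, 3, 4]],
--      [[1, 2], [3, 4]],
--      [[1, 2, 3], [4]]]
--     """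
--     if n == 1:                     # one block left → whole tail
--         yield [lst]
--         return
--     if len(lst) < n:               # impossible: not enough items
--         return
--     # choose a cut-point for the first block, then recurse
--     for i in range(1, len(lst) - n + 2):        # ensure room for `n-1` more blocks
--         head = lst[:i]
--         tail = lst[i:]
--         for rest in split_into_lists(tail, n - 1):
--             yield [head] + rest
-- ===== SOURCE B (Python) =====
-- from itertools import combinations
--
-- def split_into_lists(lst, n):
--     # Enumerate interior cut positions directly instead of recursing.
--     L = len(lst)
--     if n > L and n != 1:          # more blocks than items: no split exists
--         return
--     for cuts in combinations(range(1, L), n - 1):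
--         bounds = [0, *cuts, L]
--         yield [lst[a:b] for a, b in zip(bounds, bounds[1:])]
-- ===== Notes on version B (the rewrite author's own statement) =====
-- stated objective: alternative
-- what changed: Replaces the recursive cut-by-cut generator with a direct iterative enumeration of interior cut positions via itertools.combinations, slicing each split out of consecutive boundary pairs.
import Mathlib
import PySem

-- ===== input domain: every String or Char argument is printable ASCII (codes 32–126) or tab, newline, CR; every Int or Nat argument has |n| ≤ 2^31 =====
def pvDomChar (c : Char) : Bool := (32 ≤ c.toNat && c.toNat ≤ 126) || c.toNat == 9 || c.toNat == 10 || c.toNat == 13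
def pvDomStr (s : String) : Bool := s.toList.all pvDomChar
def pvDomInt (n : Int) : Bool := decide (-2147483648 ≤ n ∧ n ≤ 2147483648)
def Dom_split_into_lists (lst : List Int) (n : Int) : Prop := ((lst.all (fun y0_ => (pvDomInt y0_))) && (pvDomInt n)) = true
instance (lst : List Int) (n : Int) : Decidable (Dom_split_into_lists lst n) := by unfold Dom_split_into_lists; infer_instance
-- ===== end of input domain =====

-- B enumerates interior cut positions with combinations instead of A's recursion; same output, same order (objective: alternative).
-- For n ≤ 0 both Pythons raise (A: RecursionError, B: ValueError); Pre_ excludes exactly those inputs.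

-- ===== PORT A =====
-- A's recursive generator; the `0` case is a totality guard for inputs (n ≤ 0) on which Python A never returns.
def pvGoA : Nat → List Int → List (List (List Int))
  | 0, _ => ([] : List (List (List Int)))  -- unreachable under Pre_ (Python diverges for n ≤ 0)
  | 1, lst => [[lst]]              -- `if n == 1: yield [lst]`
  | k+2, lst =>
    if lst.length < k + 2 then []  -- `if len(lst) < n: return`
    else (List.range' 1 (lst.length - (k+2) + 1)).flatMap   -- `for i in range(1, len(lst)-n+2)`
      (fun i => (pvGoA (k+1) (lst.drop i)).map (fun rest => lst.take i :: rest))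
      -- head = lst[:i], tail = lst[i:]; `yield [head] + rest`

def split_into_lists (lst : List Int) (n : Int) : List (List (List Int)) := pvGoA n.toNat lst

-- ===== PORT B =====
-- itertools.combinations(xs, k) in lexicographic order
def pvCombos : Nat → List Nat → List (List Nat)
  | 0, _ => [[]]
  | _+1, [] => ([] : List (List Nat))
  | k+1, x :: xs => (pvCombos k xs).map (x :: ·) ++ pvCombos (k+1) xs

-- lst[a:b] for 0 ≤ a ≤ b (exact there: Python slice = drop a, take (b-a))
def pvSeg (lst : List Int) (a b : Nat) : List Int := (lst.drop a).take (b - a)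

-- `bounds = [0, *cuts, L]; [lst[a:b] for a, b in zip(bounds, bounds[1:])]`
def pvApply (lst : List Int) (L : Nat) (cuts : List Nat) : List (List Int) :=
  let bounds := 0 :: cuts ++ [L]
  (bounds.zip bounds.tail).map (fun p => pvSeg lst p.1 p.2)

def split_into_lists_alt (lst : List Int) (n : Int) : List (List (List Int)) :=
  if (lst.length : Int) < n ∧ n ≠ 1 then []   -- `if n > L and n != 1: return`
  else (pvCombos (n - 1).toNat (List.range' 1 (lst.length - 1))).map (pvApply lst lst.length)

-- ===== PRECONDITION & SPEC =====
-- Pre_ excludes n ≤ 0: there Python A raises RecursionError (and Python B raises ValueError).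
def Pre_split_into_lists (lst : List Int) (n : Int) : Prop := 1 ≤ n
instance (lst : List Int) (n : Int) : Decidable (Pre_split_into_lists lst n) := by unfold Pre_split_into_lists; infer_instance
def pvWitness_split_into_lists : List Int × Int := ([1, 2, 3], 2)

def Spec_split_into_lists (lst : List Int) (n : Int) (out : List (List (List Int))) : Prop := out = split_into_lists_alt lst n
instance (lst : List Int) (n : Int) (out : List (List (List Int))) : Decidable (Spec_split_into_lists lst n out) := by unfold Spec_split_into_lists; infer_instance

-- ===== CLAIM (what is proved, stated in full; the proofs are below) =====
def Claim_equal_split_into_lists : Prop := ∀ (lst : List Int) (n : Int), Dom_split_into_lists lst n → Pre_split_into_lists lst n → Spec_split_into_lists lst n (split_into_lists lst n)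

-- ===== LEMMAS AND PROOFS =====

theorem pvCombos_nil_of_lt : ∀ (xs : List Nat) (k : Nat), xs.length < k → pvCombos k xs = [] := by
  intro xs
  induction xs with
  | nil => intro k h; match k, h with | k+1, _ => rfl
  | cons x t ih =>
    intro k h
    match k, h with
    | k+1, h =>
      simp only [pvCombos]
      have h1 : t.length < k := by simp at h; omega
      have h2 : t.length < k + 1 := by omega
      rw [ih _ h1, ih _ h2]; rfl

theorem pvCombos_map (f : Nat → Nat) : ∀ (xs : List Nat) (k : Nat),
    pvCombos k (xs.map f) = (pvCombos k xs).map (List.map f) := by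
  intro xs
  induction xs with
  | nil => intro k; cases k <;> rfl
  | cons x t ih =>
    intro k
    cases k with
    | zero => rfl
    | succ k =>
      simp only [List.map_cons, pvCombos, ih, List.map_append, List.map_map]
      rfl

theorem pvCombos_range'_unroll : ∀ (len a k : Nat),
    pvCombos (k+1) (List.range' a len)
      = (List.range' a len).flatMap
          (fun i => (pvCombos k (List.range' (i+1) (a + len - (i+1)))).map (i :: ·)) := by
  intro len
  induction len with
  | zero => intro a k; rfl
  | succ len ih =>
    intro a k
    rw [List.range'_succ]
    simp only [List.flatMap_cons, pvCombos]
    have h1 : a + (len + 1) - (a + 1) = len := by omega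
    have h2 : a + 1 + len = a + (len + 1) := by omega
    rw [h1, ih (a+1) k, h2]

theorem pvSeg_shift (lst : List Int) (i a b : Nat) :
    pvSeg lst (a + i) (b + i) = pvSeg (lst.drop i) a b := by
  simp only [pvSeg, List.drop_drop, Nat.add_comm]
  congr 1
  omega

theorem pvApply_shift (lst : List Int) (i : Nat) (hi : i ≤ lst.length) (cs : List Nat) :
    pvApply lst lst.length (i :: cs.map (· + i))
      = lst.take i :: pvApply (lst.drop i) (lst.length - i) cs := by
  have hL : (0 :: cs ++ [lst.length - i]).map (· + i) = (i :: cs.map (· + i)) ++ [lst.length] := by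
    simp; omega
  have hzip : ∀ (bs : List Nat),
      ((bs.map (· + i)).zip (bs.map (· + i)).tail).map (fun p => pvSeg lst p.1 p.2)
        = (bs.zip bs.tail).map (fun p => pvSeg (lst.drop i) p.1 p.2) := by
    intro bs
    rw [← List.map_tail, List.zip_map, List.map_map]
    apply List.map_congr_left
    intro p _
    exact pvSeg_shift lst i p.1 p.2
  have key := hzip (0 :: cs ++ [lst.length - i])
  rw [hL] at key
  simp only [List.cons_append, List.tail_cons] at key
  simp only [pvApply, List.cons_append, List.tail_cons]
  have h0 : pvSeg lst 0 i = lst.take i := by simp [pvSeg]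
  rw [List.zip_cons_cons, List.map_cons, h0, key]

theorem pvFlatMap_congr_mem {α β : Type} (l : List α) {f g : α → List β}
    (h : ∀ a ∈ l, f a = g a) : l.flatMap f = l.flatMap g := by
  induction l with
  | nil => rfl
  | cons x t ih =>
    simp only [List.flatMap_cons, h x (by simp), ih (fun a ha => h a (by simp [ha]))]

theorem pvGoA_eq : ∀ (k : Nat) (lst : List Int),
    pvGoA (k+1) lst = (pvCombos k (List.range' 1 (lst.length - 1))).map (pvApply lst lst.length) := by
  intro k
  induction k with
  | zero =>
    intro lst
    simp [pvGoA, pvCombos, pvApply, pvSeg]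
  | succ k ih =>
    intro lst
    by_cases h : lst.length < k + 2
    · rw [show k + 1 + 1 = k + 2 from rfl]
      simp only [pvGoA, if_pos h]
      rw [pvCombos_nil_of_lt (List.range' 1 (lst.length - 1)) (k+1) (by rw [List.length_range']; omega)]
      rfl
    · rw [Nat.not_lt] at h
      rw [show k + 1 + 1 = k + 2 from rfl]
      simp only [pvGoA, if_neg (by omega : ¬ lst.length < k + 2)]
      rw [pvCombos_range'_unroll, List.map_flatMap]
      have hsplit : List.range' 1 (lst.length - 1)
          = List.range' 1 (lst.length - (k+2) + 1) ++ List.range' (lst.length - (k+2) + 2) k := by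
        have e1 : lst.length - 1 = (lst.length - (k+2) + 1) + k := by omega
        have e2 : lst.length - (k+2) + 2 = 1 + (lst.length - (k+2) + 1) := by omega
        rw [e1, e2]
        exact List.range'_append_1.symm
      have hdrop : ∀ (f : Nat → List (List (List Int))),
          (∀ i ∈ List.range' (lst.length - (k+2) + 2) k, f i = []) →
          List.flatMap f (List.range' 1 (lst.length - 1))
            = List.flatMap f (List.range' 1 (lst.length - (k+2) + 1)) := by
        intro f hf
        rw [hsplit, List.flatMap_append, List.flatMap_eq_nil_iff.mpr hf, List.append_nil]
      rw [hdrop _ (by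
        intro i hi
        have hi' : lst.length - (k+2) + 2 ≤ i := (List.mem_range'_1.mp hi).1
        have hi'' : i < lst.length - (k+2) + 2 + k := (List.mem_range'_1.mp hi).2
        rw [pvCombos_nil_of_lt (List.range' (i+1) (1 + (lst.length - 1) - (i+1))) k (by rw [List.length_range']; omega)]
        rfl)]
      apply pvFlatMap_congr_mem
      intro i hi
      have hi1 : 1 ≤ i := (List.mem_range'_1.mp hi).1
      have hi2 : i < 1 + (lst.length - (k+2) + 1) := (List.mem_range'_1.mp hi).2
      have hiL : i ≤ lst.length := by omega
      rw [ih (lst.drop i)]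
      have hlen : (lst.drop i).length = lst.length - i := by simp
      rw [hlen]
      have hrange : List.range' (i+1) (1 + (lst.length - 1) - (i+1))
          = (List.range' 1 (lst.length - i - 1)).map (· + i) := by
        have hm := List.map_add_range' (a := i) (s := 1) (n := lst.length - i - 1)
        rw [show (1 + (lst.length - 1) - (i + 1)) = lst.length - i - 1 by omega]
        rw [← hm]
        apply List.map_congr_left
        intro a _
        omega
      rw [hrange, pvCombos_map]
      simp only [List.map_map]
      apply List.map_congr_left
      intro cs _
      simp only [Function.comp]
      exact (pvApply_shift lst i hiL cs).symm

-- ===== VERDICT (by name: the statement is the Claim_ definition above) =====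
theorem split_into_lists_spec : Claim_equal_split_into_lists := by
  intro lst n _ hpre
  unfold Pre_split_into_lists at hpre
  unfold Spec_split_into_lists split_into_lists split_into_lists_alt
  by_cases hg : (lst.length : Int) < n ∧ n ≠ 1
  · rw [if_pos hg]
    obtain ⟨hgl, hgn⟩ := hg
    obtain ⟨k, hk⟩ : ∃ k, n.toNat = k + 2 := ⟨n.toNat - 2, by omega⟩
    rw [hk]
    simp only [pvGoA, if_pos (show lst.length < k + 2 by omega)]
  · rw [if_neg hg]
    have h1 : n.toNat = (n - 1).toNat + 1 := by omega
    rw [h1]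
    exact pvGoA_eq (n - 1).toNat lst
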